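-- pv_equiv track=rewrite | github.com/Arshiaheravi/autoflip | backend/app/services/calculations.py | _find_msrp
-- ===== SOURCE A (Python) =====
-- from typing import Optional
--
-- MSRP_DATA = {
--     "civic": 30000, "corolla": 28000, "camry": 35000, "accord": 40000,
--     "cr-v": 38000, "crv": 38000, "rav4": 38000, "rav-4": 38000,
--     "highlander": 48000, "tacoma": 45000, "tundra": 55000, "4runner": 52000,
--     "land cruiser": 75000, "landcruiser": 75000, "prius": 36000,
--     "sienna": 48000, "forester": 38000, "outback": 40000, "impreza": 30000,
--     "wrx": 38000, "crosstrek": 34000, "mazda3": 28000, "cx-5": 36000, "cx5": 36000,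
--     "cx-30": 30000, "cx-50": 42000, "cx-90": 50000,
--     "rogue": 36000, "pathfinder": 46000, "sentra": 24000, "altima": 34000,
--     "frontier": 42000, "murano": 44000,
--     "elantra": 26000, "sonata": 34000, "tucson": 36000, "santa fe": 42000,
--     "palisade": 52000, "kona": 30000, "ioniq": 45000,
--     "forte": 25000, "k5": 34000, "sportage": 36000, "sorento": 42000,
--     "telluride": 52000, "seltos": 30000, "carnival": 45000, "niro": 35000,
--     "f150": 52000, "f-150": 52000, "f250": 62000, "f-250": 62000,
--     "escape": 36000, "edge": 42000, "explorer": 48000, "bronco": 48000,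
--     "mustang": 38000, "ranger": 42000, "maverick": 32000,
--     "silverado": 52000, "equinox": 38000, "traverse": 44000, "blazer": 42000,
--     "colorado": 40000, "tahoe": 65000, "suburban": 70000,
--     "trax": 28000, "malibu": 30000,
--     "sierra": 55000, "terrain": 38000, "acadia": 44000, "yukon": 68000,
--     "ram": 52000, "ram 1500": 52000, "ram 2500": 60000,
--     "wrangler": 48000, "grand cherokee": 55000, "cherokee": 42000,
--     "gladiator": 50000, "compass": 36000,
--     "challenger": 42000, "charger": 42000, "durango": 48000,
--     "3 series": 52000, "5 series": 68000, "x1": 46000, "x3": 52000, "x5": 72000,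
--     "c-class": 52000, "e-class": 70000, "glc": 55000, "gle": 70000,
--     "a3": 40000, "a4": 48000, "q3": 42000, "q5": 50000, "q7": 65000,
--     "golf": 32000, "jetta": 28000, "tiguan": 36000, "atlas": 44000, "taos": 32000,
--     "rx350": 60000, "rx": 60000, "nx": 48000, "es": 50000, "is": 45000,
--     "rdx": 48000, "mdx": 58000, "tlx": 48000,
--     "xt4": 42000, "xt5": 52000, "xt6": 58000, "escalade": 85000,
--     "model 3": 50000, "model y": 55000, "model s": 95000, "model x": 100000,
--     "sidewinder": 22000, "ski doo": 18000, "ski-doo": 18000, "backcountry": 20000,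
--     "cooper": 32000, "mini": 32000,
-- }
--
-- def _find_msrp(title_lower: str) -> Optional[float]:
--     best_match = None
--     best_len = 0
--     for model, msrp in MSRP_DATA.items():
--         if model in title_lower and len(model) > best_len:
--             best_match = msrp
--             best_len = len(model)
--     return best_match
-- ===== SOURCE B (Python) =====
-- from typing import Optional
--
-- # Compact MSRP table: each entry is "model=price-in-thousands".
-- _MSRP_TABLE = [
--     "civic=30", "corolla=28", "camry=35", "accord=40", "cr-v=38", "crv=38",
--     "rav4=38", "rav-4=38", "highlander=48", "tacoma=45", "tundra=55", "4runner=52",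
--     "land cruiser=75", "landcruiser=75", "prius=36", "sienna=48", "forester=38", "outback=40",
--     "impreza=30", "wrx=38", "crosstrek=34", "mazda3=28", "cx-5=36", "cx5=36",
--     "cx-30=30", "cx-50=42", "cx-90=50", "rogue=36", "pathfinder=46", "sentra=24",
--     "altima=34", "frontier=42", "murano=44", "elantra=26", "sonata=34", "tucson=36",
--     "santa fe=42", "palisade=52", "kona=30", "ioniq=45", "forte=25", "k5=34",
--     "sportage=36", "sorento=42", "telluride=52", "seltos=30", "carnival=45", "niro=35",
--     "f150=52", "f-150=52", "f250=62", "f-250=62", "escape=36", "edge=42",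
--     "explorer=48", "bronco=48", "mustang=38", "ranger=42", "maverick=32", "silverado=52",
--     "equinox=38", "traverse=44", "blazer=42", "colorado=40", "tahoe=65", "suburban=70",
--     "trax=28", "malibu=30", "sierra=55", "terrain=38", "acadia=44", "yukon=68",
--     "ram=52", "ram 1500=52", "ram 2500=60", "wrangler=48", "grand cherokee=55", "cherokee=42",
--     "gladiator=50", "compass=36", "challenger=42", "charger=42", "durango=48", "3 series=52",
--     "5 series=68", "x1=46", "x3=52", "x5=72", "c-class=52", "e-class=70",
--     "glc=55", "gle=70", "a3=40", "a4=48", "q3=42", "q5=50",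
--     "q7=65", "golf=32", "jetta=28", "tiguan=36", "atlas=44", "taos=32",
--     "rx350=60", "rx=60", "nx=48", "es=50", "is=45", "rdx=48",
--     "mdx=58", "tlx=48", "xt4=42", "xt5=52", "xt6=58", "escalade=85",
--     "model 3=50", "model y=55", "model s=95", "model x=100", "sidewinder=22", "ski doo=18",
--     "ski-doo=18", "backcountry=20", "cooper=32", "mini=32",
-- ]
--
-- def _parse_table(entries):
--     pairs = []
--     for entry in entries:
--         model, kilo = entry.split("=")
--         pairs.append((model, int(kilo) * 1000))
--     return pairs
--
-- # Parsed once, stably sorted by descending model length so the first substring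
-- # match is the longest model (ties keep table order).
-- _MODELS_BY_LEN = sorted(_parse_table(_MSRP_TABLE), key=lambda kv: -len(kv[0]))
--
-- def _find_msrp(title_lower: str) -> Optional[float]:
--     for model, msrp in _MODELS_BY_LEN:
--         if model in title_lower:
--             return msrp
--     return None
-- ===== Notes on version B (the rewrite author's own statement) =====
-- stated objective: alternative
-- what changed: A scans the whole dict keeping a running best (match, length); B stores the table as compact entry strings (model and price in thousands) parsed once at module load, stably sorts the parsed pairs by descending model length, and returns the MSRP of the first model that is a substring of the title (early return).
import Mathlib
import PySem

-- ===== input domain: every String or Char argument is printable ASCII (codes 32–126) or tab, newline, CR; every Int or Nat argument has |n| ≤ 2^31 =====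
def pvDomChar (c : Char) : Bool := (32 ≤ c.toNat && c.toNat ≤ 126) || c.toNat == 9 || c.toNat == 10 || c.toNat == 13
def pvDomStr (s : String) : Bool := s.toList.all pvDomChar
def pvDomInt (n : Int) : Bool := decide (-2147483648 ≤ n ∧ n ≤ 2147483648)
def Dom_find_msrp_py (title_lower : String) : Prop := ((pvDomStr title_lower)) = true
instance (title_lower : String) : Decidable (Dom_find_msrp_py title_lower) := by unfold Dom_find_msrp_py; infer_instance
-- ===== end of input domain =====

-- B replaces A's full-scan running-max over the dict literal with a compact string table
-- parsed once, stably sorted by descending model length, and scanned first-match with early return (objective: alternative).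


-- ===== PORT A =====
-- the module-level dict MSRP_DATA (all 124 keys distinct), as an association list in insertion order
def msrpData : List (String × Int) := [
  ("civic", 30000), ("corolla", 28000), ("camry", 35000), ("accord", 40000),
  ("cr-v", 38000), ("crv", 38000), ("rav4", 38000), ("rav-4", 38000),
  ("highlander", 48000), ("tacoma", 45000), ("tundra", 55000), ("4runner", 52000),
  ("land cruiser", 75000), ("landcruiser", 75000), ("prius", 36000), ("sienna", 48000),
  ("forester", 38000), ("outback", 40000), ("impreza", 30000), ("wrx", 38000),
  ("crosstrek", 34000), ("mazda3", 28000), ("cx-5", 36000), ("cx5", 36000),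
  ("cx-30", 30000), ("cx-50", 42000), ("cx-90", 50000), ("rogue", 36000),
  ("pathfinder", 46000), ("sentra", 24000), ("altima", 34000), ("frontier", 42000),
  ("murano", 44000), ("elantra", 26000), ("sonata", 34000), ("tucson", 36000),
  ("santa fe", 42000), ("palisade", 52000), ("kona", 30000), ("ioniq", 45000),
  ("forte", 25000), ("k5", 34000), ("sportage", 36000), ("sorento", 42000),
  ("telluride", 52000), ("seltos", 30000), ("carnival", 45000), ("niro", 35000),
  ("f150", 52000), ("f-150", 52000), ("f250", 62000), ("f-250", 62000),
  ("escape", 36000), ("edge", 42000), ("explorer", 48000), ("bronco", 48000),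
  ("mustang", 38000), ("ranger", 42000), ("maverick", 32000), ("silverado", 52000),
  ("equinox", 38000), ("traverse", 44000), ("blazer", 42000), ("colorado", 40000),
  ("tahoe", 65000), ("suburban", 70000), ("trax", 28000), ("malibu", 30000),
  ("sierra", 55000), ("terrain", 38000), ("acadia", 44000), ("yukon", 68000),
  ("ram", 52000), ("ram 1500", 52000), ("ram 2500", 60000), ("wrangler", 48000),
  ("grand cherokee", 55000), ("cherokee", 42000), ("gladiator", 50000), ("compass", 36000),
  ("challenger", 42000), ("charger", 42000), ("durango", 48000), ("3 series", 52000),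
  ("5 series", 68000), ("x1", 46000), ("x3", 52000), ("x5", 72000),
  ("c-class", 52000), ("e-class", 70000), ("glc", 55000), ("gle", 70000),
  ("a3", 40000), ("a4", 48000), ("q3", 42000), ("q5", 50000),
  ("q7", 65000), ("golf", 32000), ("jetta", 28000), ("tiguan", 36000),
  ("atlas", 44000), ("taos", 32000), ("rx350", 60000), ("rx", 60000),
  ("nx", 48000), ("es", 50000), ("is", 45000), ("rdx", 48000),
  ("mdx", 58000), ("tlx", 48000), ("xt4", 42000), ("xt5", 52000),
  ("xt6", 58000), ("escalade", 85000), ("model 3", 50000), ("model y", 55000),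
  ("model s", 95000), ("model x", 100000), ("sidewinder", 22000), ("ski doo", 18000),
  ("ski-doo", 18000), ("backcountry", 20000), ("cooper", 32000), ("mini", 32000)]

-- the loop body: 'if model in title_lower and len(model) > best_len: best_match = msrp; best_len = len(model)'
def findMsrpStep (title_lower : String) (st : Option Int × Int) (kv : String × Int) : Option Int × Int :=
  if PySem.Str.isIn kv.1 title_lower && decide (st.2 < PySem.Str.len kv.1)
  then (some kv.2, PySem.Str.len kv.1) else st

def find_msrp_py (title_lower : String) : Option Int :=
  (msrpData.foldl (findMsrpStep title_lower) ((none : Option Int), (0 : Int))).1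

-- ===== PORT B =====
-- _MSRP_TABLE: compact "model=price-in-thousands" entry strings
def msrpEntries : List String := [
  "civic=30", "corolla=28", "camry=35", "accord=40", "cr-v=38",
  "crv=38", "rav4=38", "rav-4=38", "highlander=48", "tacoma=45",
  "tundra=55", "4runner=52", "land cruiser=75", "landcruiser=75", "prius=36",
  "sienna=48", "forester=38", "outback=40", "impreza=30", "wrx=38",
  "crosstrek=34", "mazda3=28", "cx-5=36", "cx5=36", "cx-30=30",
  "cx-50=42", "cx-90=50", "rogue=36", "pathfinder=46", "sentra=24",
  "altima=34", "frontier=42", "murano=44", "elantra=26", "sonata=34",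
  "tucson=36", "santa fe=42", "palisade=52", "kona=30", "ioniq=45",
  "forte=25", "k5=34", "sportage=36", "sorento=42", "telluride=52",
  "seltos=30", "carnival=45", "niro=35", "f150=52", "f-150=52",
  "f250=62", "f-250=62", "escape=36", "edge=42", "explorer=48",
  "bronco=48", "mustang=38", "ranger=42", "maverick=32", "silverado=52",
  "equinox=38", "traverse=44", "blazer=42", "colorado=40", "tahoe=65",
  "suburban=70", "trax=28", "malibu=30", "sierra=55", "terrain=38",
  "acadia=44", "yukon=68", "ram=52", "ram 1500=52", "ram 2500=60",
  "wrangler=48", "grand cherokee=55", "cherokee=42", "gladiator=50", "compass=36",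
  "challenger=42", "charger=42", "durango=48", "3 series=52", "5 series=68",
  "x1=46", "x3=52", "x5=72", "c-class=52", "e-class=70",
  "glc=55", "gle=70", "a3=40", "a4=48", "q3=42",
  "q5=50", "q7=65", "golf=32", "jetta=28", "tiguan=36",
  "atlas=44", "taos=32", "rx350=60", "rx=60", "nx=48",
  "es=50", "is=45", "rdx=48", "mdx=58", "tlx=48",
  "xt4=42", "xt5=52", "xt6=58", "escalade=85", "model 3=50",
  "model y=55", "model s=95", "model x=100", "sidewinder=22", "ski doo=18",
  "ski-doo=18", "backcountry=20", "cooper=32", "mini=32"]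

-- 'model, kilo = entry.split("="); pairs.append((model, int(kilo) * 1000))'
-- (the fallback arm is unreachable on the constant table: every entry has exactly one '=';
-- Python would raise there)
def parseEntry (entry : String) : String × Int :=
  match PySem.Str.split? entry "=" with
  | some [model, kilo] => (model, ((PySem.Int.ofStr? kilo).getD 0) * 1000)
  | _ => ("", 0)

-- _parse_table: the append loop over the entry list
def parseTable (entries : List String) : List (String × Int) :=
  entries.map parseEntry

def keyNegLen (kv : String × Int) : Int := -(PySem.Str.len kv.1)

-- _MODELS_BY_LEN = sorted(_parse_table(_MSRP_TABLE), key=lambda kv: -len(kv[0]))  (once at module load)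
def modelsByLen : List (String × Int) := PySem.List.sorted (parseTable msrpEntries) keyNegLen

-- 'for model, msrp in _MODELS_BY_LEN: if model in title_lower: return msrp' / 'return None'
def findMsrpLoop (ms : List (String × Int)) (title_lower : String) : Option Int :=
  match ms with
  | [] => none
  | (m, v) :: t => if PySem.Str.isIn m title_lower then some v else findMsrpLoop t title_lower

def find_msrp_py_alt (title_lower : String) : Option Int :=
  findMsrpLoop modelsByLen title_lower

-- ===== PRECONDITION & SPEC =====
def Spec_find_msrp_py (title_lower : String) (out : Option Int) : Prop := out = find_msrp_py_alt title_lower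
instance (title_lower : String) (out : Option Int) : Decidable (Spec_find_msrp_py title_lower out) := by unfold Spec_find_msrp_py; infer_instance

-- ===== CLAIM (what is proved, stated in full; the proofs are below) =====
def Claim_equal_find_msrp_py : Prop := ∀ (title_lower : String), Dom_find_msrp_py title_lower → Spec_find_msrp_py title_lower (find_msrp_py title_lower)

-- ===== LEMMAS AND PROOFS =====

-- B's parsed table is exactly A's dict, as an association list
set_option maxRecDepth 100000 in
set_option maxHeartbeats 4000000 in
theorem parseTable_eq : parseTable msrpEntries = msrpData := by rfl

-- B's early-return loop is find? followed by projection
theorem findMsrpLoop_eq (ms : List (String × Int)) (t : String) :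
    findMsrpLoop ms t = (ms.find? (fun kv => PySem.Str.isIn kv.1 t)).map Prod.snd := by
  induction ms with
  | nil => rfl
  | cons kv tl ih =>
    obtain ⟨m, v⟩ := kv
    cases hb : PySem.Str.isIn m t
    · rw [findMsrpLoop, if_neg (by simp only [hb]; decide),
        List.find?_cons_of_neg (by simp only [hb]; decide), ih]
    · rw [findMsrpLoop, if_pos hb, List.find?_cons_of_pos (by simpa using hb)]
      rfl

-- insertBy places x after the longest prefix of elements it need not go before
theorem insertBy_split {α : Type} (before : α → α → Bool) (x : α) (s : List α) :
    PySem.List.insertBy before x s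
      = s.takeWhile (fun y => !before x y) ++ x :: s.dropWhile (fun y => !before x y) := by
  induction s with
  | nil => rfl
  | cons y tl ih =>
    by_cases h : before x y = true <;>
      simp [PySem.List.insertBy, List.takeWhile, List.dropWhile, h, ih]

-- the running-max fold over l equals first-match search on the stably sorted list
theorem fold_eq_find_sorted (t : String) (l : List (String × Int))
    (hpos : ∀ kv ∈ l, 0 < PySem.Str.len kv.1) :
    l.foldl (findMsrpStep t) ((none : Option Int), (0 : Int))
      = match (PySem.List.sorted l keyNegLen).find? (fun kv => PySem.Str.isIn kv.1 t) with
        | none => ((none : Option Int), (0 : Int))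
        | some kv => (some kv.2, PySem.Str.len kv.1) := by
  induction l using List.reverseRecOn with
  | nil => rfl
  | append_singleton l x ih =>
    have hx : 0 < PySem.Str.len x.1 := hpos x (by simp)
    have hpos' : ∀ kv ∈ l, 0 < PySem.Str.len kv.1 := fun kv hkv => hpos kv (by simp [hkv])
    have hsorted : PySem.List.sorted (l ++ [x]) keyNegLen
        = PySem.List.insertBy (fun a b => decide (keyNegLen a < keyNegLen b)) x
            (PySem.List.sorted l keyNegLen) := by
      rw [PySem.List.sorted_eq_foldl_insertBy, PySem.List.sorted_eq_foldl_insertBy,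
        List.foldl_append]
      rfl
    have hpair : (PySem.List.sorted l keyNegLen).Pairwise
        (fun a b => keyNegLen a ≤ keyNegLen b) := PySem.List.sorted_pairwise l keyNegLen
    rw [List.foldl_append, List.foldl_cons, List.foldl_nil, ih hpos', hsorted, insertBy_split]
    generalize hsdef : PySem.List.sorted l keyNegLen = s at hpair
    set q : String × Int → Bool := fun y => !(decide (keyNegLen x < keyNegLen y)) with hq
    have hsplit : s = s.takeWhile q ++ s.dropWhile q := (List.takeWhile_append_dropWhile).symm
    have hs1len : ∀ y ∈ s.takeWhile q, PySem.Str.len x.1 ≤ PySem.Str.len y.1 := by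
      intro y hy
      have := List.mem_takeWhile_imp hy
      simp only [hq, Bool.not_eq_true', decide_eq_false_iff_not, keyNegLen, not_lt] at this
      omega
    have hs2len : ∀ y ∈ s.dropWhile q, PySem.Str.len y.1 < PySem.Str.len x.1 := by
      intro y hy
      rcases hz : s.dropWhile q with _ | ⟨z, tl⟩
      · rw [hz] at hy; simp at hy
      · have hzfail : q z = false := by
          have hne : s.dropWhile q ≠ [] := by rw [hz]; simp
          have h' := List.head_dropWhile_not q hne
          simp only [hz, List.head_cons] at h'
          exact h'
        have hxz : keyNegLen x < keyNegLen z := by simpa [hq] using hzfail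
        have hzy : keyNegLen z ≤ keyNegLen y := by
          rw [hz] at hy
          rcases (by simpa using hy : y = z ∨ y ∈ tl) with rfl | hmem
          · exact le_refl _
          · have hpair2 : (s.dropWhile q).Pairwise
                (fun a b => keyNegLen a ≤ keyNegLen b) := by
              rw [hsplit] at hpair
              exact (List.pairwise_append.mp hpair).2.1
            rw [hz] at hpair2
            exact (List.pairwise_cons.mp hpair2).1 y hmem
        simp only [keyNegLen] at hxz hzy
        omega
    have hfind : List.find? (fun kv => PySem.Str.isIn kv.1 t) s
        = (List.find? (fun kv => PySem.Str.isIn kv.1 t) (s.takeWhile q)).or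
            (List.find? (fun kv => PySem.Str.isIn kv.1 t) (s.dropWhile q)) := by
      rw [hsplit, List.find?_append]; rw [← hsplit]
    rw [hfind, List.find?_append]
    rcases h1 : List.find? (fun kv => PySem.Str.isIn kv.1 t) (s.takeWhile q) with _ | y
    · -- no match among the models at least as long as x
      rw [h1, Option.none_or, Option.none_or]
      cases hb : PySem.Str.isIn x.1 t
      · -- x does not match either: both sides fall through to the tail
        rw [List.find?_cons_of_neg (by simp only [hb]; decide)]
        rcases h2 : List.find? (fun kv => PySem.Str.isIn kv.1 t) (s.dropWhile q) with _ | z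
        · rw [h2]
          show findMsrpStep t ((none : Option Int), (0 : Int)) x = ((none : Option Int), (0 : Int))
          unfold findMsrpStep
          rw [if_neg (by simp only [hb, Bool.false_and]; decide)]
        · rw [h2]
          show findMsrpStep t (some z.2, PySem.Str.len z.1) x = (some z.2, PySem.Str.len z.1)
          unfold findMsrpStep
          rw [if_neg (by simp only [hb, Bool.false_and]; decide)]
      · -- x matches: it beats anything later (all strictly shorter)
        rw [List.find?_cons_of_pos (by exact hb)]
        rcases h2 : List.find? (fun kv => PySem.Str.isIn kv.1 t) (s.dropWhile q) with _ | z
        · rw [h2]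
          show findMsrpStep t ((none : Option Int), (0 : Int)) x = (some x.2, PySem.Str.len x.1)
          unfold findMsrpStep
          rw [if_pos (by simp only [hb, Bool.true_and, decide_eq_true_eq]; exact hx)]
        · have hz := hs2len z (List.mem_of_find?_eq_some h2)
          rw [h2]
          show findMsrpStep t (some z.2, PySem.Str.len z.1) x = (some x.2, PySem.Str.len x.1)
          unfold findMsrpStep
          rw [if_pos (by simp only [hb, Bool.true_and, decide_eq_true_eq]; exact hz)]
    · -- a match among models at least as long as x: x cannot improve on it
      have hy := hs1len y (List.mem_of_find?_eq_some h1)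
      rw [h1, Option.some_or, Option.some_or]
      show findMsrpStep t (some y.2, PySem.Str.len y.1) x = (some y.2, PySem.Str.len y.1)
      unfold findMsrpStep
      rw [if_neg (by rw [decide_eq_false (not_lt.mpr hy), Bool.and_false]; decide)]

-- ===== VERDICT (by name: the statement is the Claim_ definition above) =====
set_option maxRecDepth 8192 in
theorem find_msrp_py_spec : Claim_equal_find_msrp_py := by
  intro t _
  unfold Spec_find_msrp_py find_msrp_py find_msrp_py_alt modelsByLen
  rw [parseTable_eq, fold_eq_find_sorted t msrpData (by decide), findMsrpLoop_eq]
  rcases h : (PySem.List.sorted msrpData keyNegLen).find?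
      (fun kv => PySem.Str.isIn kv.1 t) with _ | kv <;> rw [h] <;> rfl
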